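-- pv_equiv track=rewrite | github.com/mbjackson-capp/everybodycodes | algorithmia/q2.py | count_runic_words
-- ===== SOURCE A (Python) =====
-- def count_runic_words(words: list[str], helmet: str):
--     count = 0
--     for ix, char in enumerate(helmet):
--         possible_words = [w for w in words if w[0] == char]
--         for pword in possible_words:
--             try:
--                 if helmet[ix : ix + len(pword)] == pword:
--                     count += 1
--             except IndexError:
--                 continue
--     return count
-- ===== SOURCE B (Python) =====
-- def count_runic_words(words: list[str], helmet: str):
--     n = len(helmet)
--     total = 0
--     for w in words:
--         i = helmet.find(w)
--         while 0 <= i < n: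
--             total += 1
--             i = helmet.find(w, i + 1)
--     return total
-- ===== Notes on version B (the rewrite author's own statement) =====
-- stated objective: faster
-- what changed: B inverts the iteration: instead of walking every helmet position and re-filtering/slicing the word list there, it scans once per word, jumping directly between its overlapping occurrences with str.find(w, i+1), so non-matching positions are skipped by the library substring search.
import Mathlib
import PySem

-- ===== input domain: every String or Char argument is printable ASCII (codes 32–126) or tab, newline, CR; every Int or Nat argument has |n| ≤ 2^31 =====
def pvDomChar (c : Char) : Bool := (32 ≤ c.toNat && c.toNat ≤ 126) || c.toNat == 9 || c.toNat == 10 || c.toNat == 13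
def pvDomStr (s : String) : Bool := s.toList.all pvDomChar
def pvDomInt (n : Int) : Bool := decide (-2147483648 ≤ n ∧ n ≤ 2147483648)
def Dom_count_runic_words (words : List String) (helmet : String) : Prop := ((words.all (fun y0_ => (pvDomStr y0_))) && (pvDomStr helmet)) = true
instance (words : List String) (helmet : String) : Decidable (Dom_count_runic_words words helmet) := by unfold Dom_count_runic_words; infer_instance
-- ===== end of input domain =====

-- B inverts the iteration: one find-jump scan per word over the helmet (overlapping matches via
-- str.find(w, i+1)) instead of A's per-position re-filter of the word list; measured faster.


-- ===== PORT A =====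
-- for ix, char in enumerate(helmet): filter words by w[0] == char, then compare helmet[ix:ix+len(w)]
-- (the try/except IndexError around the slice comparison is dead code: slicing never raises)
def count_runic_words (words : List String) (helmet : String) : Int :=
  (PySem.List.enumerate helmet.toList 0).foldl
    (fun count p =>
      let possible_words := words.filter (fun w => PySem.Str.pyGet? w 0 == some p.2)
      possible_words.foldl
        (fun c pword =>
          if PySem.List.slice helmet.toList (some p.1) (some (p.1 + PySem.Str.len pword)) = pword.toList
          then c + 1 else c)
        count)
    0

-- ===== PORT B =====
-- Source B's inner 'while 0 <= i < n: total += 1; i = helmet.find(w, i + 1)' as a fueled recursion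
-- (fuel len(helmet)+1 is a termination bound only: found indices strictly increase and stay ≤ len)
def pvFindLoop (h w : List Char) : Nat → Int → Int
  | 0, _ => 0
  | fuel + 1, i =>
    if 0 ≤ i ∧ i < (h.length : Int) then
      1 + pvFindLoop h w fuel (PySem.Chars.findFrom h w (i + 1) none)
    else 0

-- Source B: for w in words, jump between overlapping occurrences with find; helmet.find(w) / find(w, i+1)
-- are PySem.Chars.find / findFrom (exact)
def count_runic_words_alt (words : List String) (helmet : String) : Int :=
  words.foldl
    (fun total w =>
      total + pvFindLoop helmet.toList w.toList (helmet.toList.length + 1)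
                (PySem.Chars.find helmet.toList w.toList))
    0

-- ===== PRECONDITION & SPEC =====
-- Pre_ excludes exactly the inputs on which A raises: words containing the empty string together
-- with a nonempty helmet, where A evaluates ''[0] and raises IndexError.
def Pre_count_runic_words (words : List String) (helmet : String) : Prop := "" ∈ words → helmet = ""
instance (words : List String) (helmet : String) : Decidable (Pre_count_runic_words words helmet) := by unfold Pre_count_runic_words; infer_instance
def pvWitness_count_runic_words : List String × String := (["ab", "b"], "abab")

def Spec_count_runic_words (words : List String) (helmet : String) (out : Int) : Prop := out = count_runic_words_alt words helmet
instance (words : List String) (helmet : String) (out : Int) : Decidable (Spec_count_runic_words words helmet out) := by unfold Spec_count_runic_words; infer_instance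

-- ===== CLAIM (what is proved, stated in full; the proofs are below) =====
def Claim_equal_count_runic_words : Prop := ∀ (words : List String) (helmet : String), Dom_count_runic_words words helmet → Pre_count_runic_words words helmet → Spec_count_runic_words words helmet (count_runic_words words helmet)

-- ===== LEMMAS AND PROOFS =====

-- slice comparison at a natural index IS a prefix test on the dropped list
lemma pvPred (h : List Char) (k : Nat) (w : String) :
    decide (PySem.List.slice h (some (k : Int)) (some ((k : Int) + PySem.Str.len w)) = w.toList)
    = w.toList.isPrefixOf (h.drop k) := by
  rw [show PySem.Str.len w = ((w.toList.length : Nat) : Int) from by simp [PySem.Str.len_eq],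
    PySem.List.slice_natCast_add h k w.toList.length]
  by_cases hp : w.toList <+: h.drop k
  · rw [decide_eq_true ((List.prefix_iff_eq_take.mp hp).symm), List.isPrefixOf_iff_prefix.mpr hp]
  · rw [decide_eq_false (fun he => hp (List.prefix_iff_eq_take.mpr he.symm))]
    exact (Bool.eq_false_iff.mpr (fun ht => hp (List.isPrefixOf_iff_prefix.mp ht))).symm

-- A as a sum over positions of per-position filtered counts
lemma pvA_eq (words : List String) (helmet : String) :
    count_runic_words words helmet
    = ((List.range helmet.toList.length).map
        (fun (k : Nat) => (((words.filter (fun w => PySem.Str.pyGet? w 0 == some (PySem.List.pyGetD helmet.toList (k : Int) ' '))).countP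
            (fun w => w.toList.isPrefixOf (helmet.toList.drop k)) : Nat) : Int))).sum := by
  unfold count_runic_words
  rw [PySem.List.enumerate_eq_map_pyRange helmet.toList ' ', List.foldl_map,
    show PySem.List.len helmet.toList = ((helmet.toList.length : Nat) : Int) from by
      simp [PySem.List.len],
    PySem.List.pyRange_zero_natCast, List.foldl_map]
  show List.foldl
      (fun (count : Int) (k : Nat) =>
        (words.filter (fun w => PySem.Str.pyGet? w 0 == some (PySem.List.pyGetD helmet.toList (k : Int) ' '))).foldl
          (fun c pword =>
            if PySem.List.slice helmet.toList (some (k : Int)) (some ((k : Int) + PySem.Str.len pword)) = pword.toList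
            then c + 1 else c)
          count)
      0 (List.range helmet.toList.length) = _
  have hpt : ∀ (acc : Int), ∀ k ∈ List.range helmet.toList.length,
      ((words.filter (fun w => PySem.Str.pyGet? w 0 == some (PySem.List.pyGetD helmet.toList (k : Int) ' '))).foldl
        (fun c pword =>
          if PySem.List.slice helmet.toList (some (k : Int)) (some ((k : Int) + PySem.Str.len pword)) = pword.toList
          then c + 1 else c)
        acc)
      = acc + (((words.filter (fun w => PySem.Str.pyGet? w 0 == some (PySem.List.pyGetD helmet.toList (k : Int) ' '))).countP
          (fun w => w.toList.isPrefixOf (helmet.toList.drop k)) : Nat) : Int) := by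
    intro acc k _
    rw [PySem.List.foldl_ite_add_one
      (fun pword => PySem.List.slice helmet.toList (some (k : Int)) (some ((k : Int) + PySem.Str.len pword)) = pword.toList)]
    congr 2
    exact List.countP_congr (fun x _ => by rw [pvPred helmet.toList k x])
  rw [PySem.List.foldl_congr_mem _ _ _ _ hpt, PySem.List.foldl_add, zero_add]

-- the find-jump loop counts the occurrence positions ≥ k, by induction on the fuel
lemma pvLoop (h w : List Char) (hw : w ≠ []) :
    ∀ (fuel k : Nat), k ≤ h.length → h.length + 1 - k ≤ fuel →
    pvFindLoop h w fuel (PySem.Chars.findFrom h w (k : Int) none)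
    = (((Finset.range h.length).filter (fun i => k ≤ i ∧ w <+: h.drop i)).card : Int) := by
  intro fuel
  induction fuel with
  | zero => intro k hk hf; omega
  | succ f ih =>
    intro k hk hf
    by_cases hj : PySem.Chars.findFrom h w (k : Int) none = -1
    · have hno : ¬ w <:+: h.drop k := (PySem.Chars.findFrom_natCast_eq_neg_one_iff h w k hk).mp hj
      rw [hj]
      simp only [pvFindLoop, if_neg (by omega : ¬ ((0:Int) ≤ -1 ∧ (-1:Int) < (h.length : Int)))]
      have : (Finset.range h.length).filter (fun i => k ≤ i ∧ w <+: h.drop i) = ∅ := by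
        apply Finset.filter_eq_empty_iff.mpr
        intro i _ hi
        apply hno
        have hdrop : h.drop i = (h.drop k).drop (i - k) := by
          rw [List.drop_drop]; congr 1; omega
        exact (hi.2.isInfix).trans (by rw [hdrop]; exact (List.drop_suffix _ _).isInfix)
      rw [this]; simp
    · obtain ⟨hkj, hpre, hnone⟩ := PySem.Chars.findFrom_natCast_spec h w k hk hj
      set j := PySem.Chars.findFrom h w (k : Int) none with hjdef
      have hj0 : 0 ≤ j := le_trans (by exact_mod_cast Int.natCast_nonneg k) hkj
      have hkjn : k ≤ j.toNat := by omega
      have hjlen : j.toNat < h.length := by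
        by_contra hge
        have : h.drop j.toNat = [] := List.drop_eq_nil_of_le (by omega)
        rw [this] at hpre
        exact hw (List.prefix_nil.mp hpre)
      have hstep : pvFindLoop h w (f + 1) j
          = 1 + pvFindLoop h w f (PySem.Chars.findFrom h w (((j.toNat + 1 : Nat) : Int)) none) := by
        simp only [pvFindLoop]
        have hc : ((j.toNat + 1 : Nat) : Int) = j + 1 := by omega
        rw [hc, if_pos (show (0:Int) ≤ j ∧ j < (h.length : Int) by omega)]
      rw [hstep, ih (j.toNat + 1) (by omega) (by omega)]
      have hset : (Finset.range h.length).filter (fun i => k ≤ i ∧ w <+: h.drop i)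
          = insert j.toNat ((Finset.range h.length).filter (fun i => j.toNat + 1 ≤ i ∧ w <+: h.drop i)) := by
        ext i
        simp only [Finset.mem_filter, Finset.mem_range, Finset.mem_insert]
        constructor
        · rintro ⟨hilen, hki, hpi⟩
          rcases Nat.lt_or_ge i (j.toNat + 1) with hlt | hge
          · rcases Nat.lt_or_ge i j.toNat with hlt' | hge'
            · exact absurd hpi (hnone i hki hlt')
            · left; omega
          · right; exact ⟨hilen, hge, hpi⟩
        · rintro (rfl | ⟨hilen, hge, hpi⟩)
          · exact ⟨hjlen, hkjn, hpre⟩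
          · exact ⟨hilen, by omega, hpi⟩
      rw [hset, Finset.card_insert_of_notMem (by
        simp only [Finset.mem_filter, Finset.mem_range]
        rintro ⟨_, hge, _⟩; omega)]
      push_cast
      ring

-- the whole per-word scan counts all occurrence positions
lemma pvLoopTop (h : List Char) (w : List Char) (hw : w ≠ []) :
    pvFindLoop h w (h.length + 1) (PySem.Chars.find h w)
    = (((Finset.range h.length).filter (fun i => w <+: h.drop i)).card : Int) := by
  have h0 : PySem.Chars.find h w = PySem.Chars.findFrom h w ((0 : Nat) : Int) none := by
    simp
  rw [h0, pvLoop h w hw (h.length + 1) 0 (by omega) (by omega)]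
  congr 2
  apply Finset.filter_congr
  intro i _
  simp

-- B as the sum over words of occurrence counts
lemma pvB_eq (words : List String) (helmet : String)
    (hpre : ∀ w ∈ words, w ≠ "") :
    count_runic_words_alt words helmet
    = (words.map (fun w =>
        (((Finset.range helmet.toList.length).filter (fun i => w.toList <+: helmet.toList.drop i)).card : Int))).sum := by
  unfold count_runic_words_alt
  have hpt : ∀ (acc : Int), ∀ w ∈ words,
      acc + pvFindLoop helmet.toList w.toList (helmet.toList.length + 1) (PySem.Chars.find helmet.toList w.toList)
      = acc + (((Finset.range helmet.toList.length).filter (fun i => w.toList <+: helmet.toList.drop i)).card : Int) := by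
    intro acc w hw
    rw [pvLoopTop helmet.toList w.toList (by
      intro hnil
      exact hpre w hw (String.toList_eq_nil_iff.mp hnil))]
  rw [PySem.List.foldl_congr_mem _ _ _ _ hpt, PySem.List.foldl_add, zero_add]

-- List.range sum ↔ Finset.range sum
lemma pvSumRange (n : Nat) (g : Nat → Int) :
    ((List.range n).map g).sum = ∑ k ∈ Finset.range n, g k := by
  induction n with
  | zero => simp
  | succ n ih => rw [List.range_succ, Finset.sum_range_succ]; simp [ih]

-- exchange the two summations (positions outside, words inside ↔ words outside)
lemma pvSwap (l : List String) (n : Nat) (f : Nat → String → Int) :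
    ((List.range n).map (fun k => (l.map (f k)).sum)).sum
    = (l.map (fun w => ((List.range n).map (fun k => f k w)).sum)).sum := by
  induction l with
  | nil => simp
  | cons w ws ih =>
    simp only [List.map_cons, List.sum_cons]
    rw [← ih, PySem.List.sum_map_add_int]

-- A also equals the per-word occurrence-count sum, given no empty word
lemma pvA_mid (words : List String) (helmet : String)
    (hpre : ∀ w ∈ words, w ≠ "") :
    count_runic_words words helmet
    = (words.map (fun w =>
        (((Finset.range helmet.toList.length).filter (fun i => w.toList <+: helmet.toList.drop i)).card : Int))).sum := by
  rw [pvA_eq]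
  have h1 : ∀ k ∈ List.range helmet.toList.length,
      (((words.filter (fun w => PySem.Str.pyGet? w 0 == some (PySem.List.pyGetD helmet.toList (k : Int) ' '))).countP
          (fun w => w.toList.isPrefixOf (helmet.toList.drop k)) : Nat) : Int)
      = (words.map (fun w => if w.toList <+: helmet.toList.drop k then (1 : Int) else 0)).sum := by
    intro k hk
    have hklen : k < helmet.toList.length := List.mem_range.mp hk
    rw [List.countP_filter]
    have hcong : words.countP
        (fun w => w.toList.isPrefixOf (helmet.toList.drop k) &&
          (PySem.Str.pyGet? w 0 == some (PySem.List.pyGetD helmet.toList (k : Int) ' ')))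
        = words.countP (fun w => w.toList.isPrefixOf (helmet.toList.drop k)) := by
      apply List.countP_congr
      intro w hw
      simp only [Bool.and_eq_true, beq_iff_eq]
      constructor
      · exact fun hand => hand.1
      · intro hp
        refine ⟨hp, ?_⟩
        -- the first character of a nonempty prefix at k is helmet[k]
        obtain ⟨c, rest, hcr⟩ : ∃ c rest, w.toList = c :: rest := by
          cases hcl : w.toList with
          | nil => exact absurd (String.toList_eq_nil_iff.mp hcl) (hpre w hw)
          | cons c rest => exact ⟨c, rest, rfl⟩
        have hpfx := List.isPrefixOf_iff_prefix.mp hp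
        rw [hcr] at hpfx
        obtain ⟨t, ht⟩ := hpfx
        have hhead : (helmet.toList.drop k)[0]? = some c := by
          rw [← ht]; rfl
        rw [List.getElem?_drop] at hhead
        have hget : PySem.List.pyGetD helmet.toList (k : Int) ' ' = c := by
          rw [PySem.List.pyGetD_natCast]
          simp only [Nat.add_zero] at hhead
          simp [hhead]
        rw [hget]
        simp [PySem.Str.pyGet?, PySem.Chars.pyGet?, PySem.List.pyGet?, PySem.List.pyIdx?, hcr]
    rw [hcong, ← PySem.List.sum_map_ite_one_zero]
    congr 1
    apply List.map_congr_left
    intro w _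
    by_cases hp : w.toList <+: helmet.toList.drop k
    · rw [if_pos (List.isPrefixOf_iff_prefix.mpr hp), if_pos hp]
    · rw [if_neg (fun hb => hp (List.isPrefixOf_iff_prefix.mp hb)), if_neg hp]
  rw [List.map_congr_left h1, pvSwap]
  apply congrArg
  apply List.map_congr_left
  intro w _
  rw [pvSumRange]
  rw [Finset.card_filter]
  push_cast
  apply Finset.sum_congr rfl
  intro i _
  by_cases hp : w.toList <+: helmet.toList.drop i <;> simp [hp]

-- on an empty helmet the loop condition 0 <= i < 0 never holds
lemma pvFindLoop_nil (w : List Char) (fuel : Nat) (i : Int) :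
    pvFindLoop [] w fuel i = 0 := by
  cases fuel with
  | zero => rfl
  | succ f =>
    simp only [pvFindLoop]
    rw [if_neg]
    rintro ⟨h0, hlt⟩
    simp only [List.length_nil, Nat.cast_zero] at hlt
    omega

-- so B returns 0 on an empty helmet (as does A, whose position loop never runs)
lemma pvB_empty (words : List String) : count_runic_words_alt words "" = 0 := by
  unfold count_runic_words_alt
  rw [PySem.List.foldl_add, zero_add]
  have h0 : "".toList = ([] : List Char) := rfl
  rw [List.map_congr_left (fun w _ => by rw [h0, pvFindLoop_nil])]
  simp

-- ===== VERDICT (by name: the statements are the Claim_ definitions above) =====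
theorem count_runic_words_spec : Claim_equal_count_runic_words := by
  intro words helmet _ hpre
  unfold Spec_count_runic_words
  by_cases hh : helmet = ""
  · subst hh
    rw [pvB_empty]
    simp [count_runic_words]
  · have hne : ∀ w ∈ words, w ≠ "" := by
      intro w hw rfl
      exact hh (hpre hw)
    rw [pvA_mid words helmet hne, pvB_eq words helmet hne]
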